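-- pv_equiv track=rewrite | github.com/pypi-data/pypi-mirror-400 | packages/ptwordpress/ptwordpress-0.0.41-py3-none-any.whl/ptwordpress/modules/wordpress_downloader/wordpres_downloader.py | filter_versions
-- ===== SOURCE A (Python) =====
-- def filter_versions(versions):
--     """
--     Filter out redundant minor versions. Only keep the highest version for each major.minor combination.
--     """
--     seen = set()
--     filtered_versions = []
--
--     for version in versions:
--         major_minor = '.'.join(version.split('.')[:2])  # Extract the major.minor part
--         if major_minor not in seen:
--             filtered_versions.append(version)
--             seen.add(major_minor)
--
--     return filtered_versions
-- ===== SOURCE B (Python) =====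
-- def filter_versions(versions):
--     """
--     Filter out redundant minor versions. Only keep the highest version for each major.minor combination.
--     """
--     pending = [('.'.join(v.split('.')[:2]), v) for v in versions]
--     filtered_versions = []
--     while pending:
--         prefix, version = pending[0]
--         filtered_versions.append(version)
--         pending = [pv for pv in pending[1:] if pv[0] != prefix]
--     return filtered_versions
-- ===== Notes on version B (the rewrite author's own statement) =====
-- stated objective: alternative
-- what changed: Replaces A's single pass with a seen-set, parallel output list and membership branch by a staged nub-by-prefix: one map pass pairs each version with its major.minor prefix, then a loop repeatedly keeps the first pending pair and deletes every later pair sharing its prefix with a filter pass.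
import Mathlib
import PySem

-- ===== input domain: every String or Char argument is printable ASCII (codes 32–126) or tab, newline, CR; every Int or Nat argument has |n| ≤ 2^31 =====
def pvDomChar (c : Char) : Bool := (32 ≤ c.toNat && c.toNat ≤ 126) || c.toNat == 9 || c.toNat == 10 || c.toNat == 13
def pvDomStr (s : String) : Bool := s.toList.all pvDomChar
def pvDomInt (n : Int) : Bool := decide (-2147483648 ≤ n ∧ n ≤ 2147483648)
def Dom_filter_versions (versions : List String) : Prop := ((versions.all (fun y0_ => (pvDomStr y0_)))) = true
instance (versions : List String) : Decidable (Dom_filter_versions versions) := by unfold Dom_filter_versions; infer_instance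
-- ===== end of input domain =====

-- B is a staged nub-by-prefix: pair each version with its major.minor prefix in one map pass, then
-- repeatedly keep the first pair and delete all later pairs with its prefix — no seen-set, no membership branch
-- (objective: alternative).

-- shared helper: '.'.join(version.split('.')[:2])
def pvMajorMinor (version : String) : String :=
  PySem.Str.join "." (PySem.List.slice ((PySem.Str.split? version ".").getD []) none (some 2))

-- ===== PORT A =====
def filter_versions (versions : List String) : List String :=
  (versions.foldl
    (fun (st : PySem.Set String × List String) version =>
      let major_minor := pvMajorMinor version
      if PySem.Set.contains st.1 major_minor then st
      else (PySem.Set.add st.1 major_minor, st.2 ++ [version]))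
    (PySem.Set.empty, [])).2

-- ===== PORT B =====
def pvNubLoop (filtered_versions : List String) : List (String × String) → List String
  | [] => filtered_versions
  | (pfx, version) :: rest =>
    pvNubLoop (filtered_versions ++ [version]) (rest.filter (fun pv => pv.1 != pfx))
termination_by pending => pending.length
decreasing_by
  simp only [List.length_cons, List.length_unattach, Nat.lt_succ_iff]
  exact le_trans (List.length_filter_le _ _) (le_of_eq List.length_attach)

def filter_versions_alt (versions : List String) : List String :=
  pvNubLoop [] (versions.map (fun v => (pvMajorMinor v, v)))

-- ===== PRECONDITION & SPEC =====
def Spec_filter_versions (versions : List String) (out : List String) : Prop := out = filter_versions_alt versions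
instance (versions : List String) (out : List String) : Decidable (Spec_filter_versions versions out) := by unfold Spec_filter_versions; infer_instance

-- ===== CLAIM (what is proved, stated in full; the proofs are below) =====
def Claim_equal_filter_versions : Prop := ∀ (versions : List String), Dom_filter_versions versions → Spec_filter_versions versions (filter_versions versions)

-- ===== LEMMAS AND PROOFS =====

-- A's loop body, named so the induction can rewrite with it
def pvStepA (st : PySem.Set String × List String) (version : String) :
    PySem.Set String × List String :=
  let major_minor := pvMajorMinor version
  if PySem.Set.contains st.1 major_minor then st
  else (PySem.Set.add st.1 major_minor, st.2 ++ [version])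

theorem filter_versions_eq_foldl (vs : List String) :
    filter_versions vs = (vs.foldl pvStepA (PySem.Set.empty, [])).2 := rfl

theorem pvStepA_mem (st : PySem.Set String × List String) (v : String)
    (h : pvMajorMinor v ∈ st.1) : pvStepA st v = st := by
  simp [pvStepA, h]

theorem pvStepA_not_mem (st : PySem.Set String × List String) (v : String)
    (h : pvMajorMinor v ∉ st.1) :
    pvStepA st v = (st.1 ++ [pvMajorMinor v], st.2 ++ [v]) := by
  simp [pvStepA, PySem.Set.add, h]

-- A's loop with the accumulator factored out
def pvGo (s : PySem.Set String) : List String → List String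
  | [] => []
  | v :: vs =>
    if PySem.Set.contains s (pvMajorMinor v) then pvGo s vs
    else v :: pvGo (PySem.Set.add s (pvMajorMinor v)) vs

theorem pvGo_foldl (vs : List String) (s : PySem.Set String) (out : List String) :
    (vs.foldl pvStepA (s, out)).2 = out ++ pvGo s vs := by
  induction vs generalizing s out with
  | nil => simp [pvGo]
  | cons v vs ih =>
    rw [List.foldl_cons]
    by_cases h : pvMajorMinor v ∈ s
    · rw [pvStepA_mem (s, out) v h, ih, pvGo]
      simp [h]
    · rw [pvStepA_not_mem (s, out) v h, ih, pvGo]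
      have : PySem.Set.add s (pvMajorMinor v) = s ++ [pvMajorMinor v] := by
        simp [PySem.Set.add, h]
      simp [h]

theorem pvGo_eq_nub (vs : List String) (s : PySem.Set String) (acc : List String) :
    pvNubLoop acc ((vs.filter (fun v => !PySem.Set.contains s (pvMajorMinor v))).map
      (fun v => (pvMajorMinor v, v))) = acc ++ pvGo s vs := by
  induction vs generalizing s acc with
  | nil => rw [List.filter_nil, List.map_nil, pvNubLoop, pvGo, List.append_nil]
  | cons v vs ih =>
    by_cases h : pvMajorMinor v ∈ s
    · rw [List.filter_cons_of_neg (by simp [h])]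
      rw [pvGo, if_pos (by simp [h])]
      exact ih s acc
    · rw [List.filter_cons_of_pos (by simp [h]), List.map_cons, pvNubLoop]
      rw [pvGo, if_neg (by simp [h])]
      have hswap :
          ((vs.filter (fun w => !PySem.Set.contains s (pvMajorMinor w))).map
              (fun v => (pvMajorMinor v, v))).filter (fun pv => pv.1 != pvMajorMinor v)
          = (vs.filter (fun w =>
              !PySem.Set.contains (PySem.Set.add s (pvMajorMinor v)) (pvMajorMinor w))).map
              (fun v => (pvMajorMinor v, v)) := by
        rw [List.filter_map, List.filter_filter]
        refine congrArg (List.map _) ?_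
        apply List.filter_congr
        intro w _
        have hadd : PySem.Set.add s (pvMajorMinor v) = s ++ [pvMajorMinor v] := by
          simp [PySem.Set.add, h]
        by_cases h1 : pvMajorMinor w ∈ s <;> by_cases h2 : pvMajorMinor w = pvMajorMinor v <;>
          simp [hadd, h1, h2, PySem.Set.contains, bne]
      rw [hswap, ih (PySem.Set.add s (pvMajorMinor v)) (acc ++ [v])]
      simp

-- ===== VERDICT (by name: the statement is the Claim_ definition above) =====
theorem filter_versions_spec : Claim_equal_filter_versions := by
  intro versions _
  unfold Spec_filter_versions filter_versions_alt
  rw [filter_versions_eq_foldl, pvGo_foldl versions PySem.Set.empty []]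
  rw [← pvGo_eq_nub versions PySem.Set.empty []]
  refine congrArg (pvNubLoop []) (congrArg (List.map _) ?_)
  simp [PySem.Set.empty, PySem.Set.contains]
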